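-- pv_equiv track=rewrite | github.com/robertobalestri/SEMAMORPH_Semantic_and_Morphological_Cataloging_of_TV_Series | backend/src/recap_gen/utils.py | build_exclusion_list
-- ===== SOURCE A (Python) =====
-- from typing import List, Dict, Any, Optional, Tuple
--
-- def build_exclusion_list(current_season: str, current_episode: str) -> List[tuple]:
--     """Build list of episodes to exclude (current + future)."""
--     exclude_episodes = []
--
--     try:
--         season_num = int(current_season[1:])  # S01 -> 1
--         episode_num = int(current_episode[1:])  # E09 -> 9
--     except:
--         return [(current_season, current_episode)]
--
--     # Exclude current episode
--     exclude_episodes.append((current_season, current_episode))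
--
--     # Exclude future episodes in current season
--     for ep in range(episode_num + 1, 25):
--         exclude_episodes.append((current_season, f"E{ep:02d}"))
--
--     # Exclude future seasons
--     for season in range(season_num + 1, 21):
--         for ep in range(1, 25):
--             exclude_episodes.append((f"S{season:02d}", f"E{ep:02d}"))
--
--     return exclude_episodes
-- ===== SOURCE B (Python) =====
-- def build_exclusion_list(current_season: str, current_episode: str) -> list:
--     """Build list of episodes to exclude (current + future)."""
--     try:
--         season_num = int(current_season[1:])
--         episode_num = int(current_episode[1:])
--     except Exception:
--         return [(current_season, current_episode)]
--     # rest of the current season, as one comprehension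
--     current = [(current_season, "E%02d" % ep) for ep in range(episode_num + 1, 25)]
--     # all future-season episodes, from a single flat index via divmod
--     future = [("S%02d" % (season_num + 1 + k // 24), "E%02d" % (1 + k % 24))
--               for k in range(24 * (20 - season_num))]
--     return [(current_season, current_episode)] + current + future
-- ===== Notes on version B (the rewrite author's own statement) =====
-- stated objective: alternative
-- what changed: A builds the list by appending inside three separate loop sections (one append, a loop, and two nested loops); B returns one concatenation of comprehensions and generates the whole future-seasons block from a single flat index using divmod instead of nested season/episode loops.
import Mathlib
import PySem

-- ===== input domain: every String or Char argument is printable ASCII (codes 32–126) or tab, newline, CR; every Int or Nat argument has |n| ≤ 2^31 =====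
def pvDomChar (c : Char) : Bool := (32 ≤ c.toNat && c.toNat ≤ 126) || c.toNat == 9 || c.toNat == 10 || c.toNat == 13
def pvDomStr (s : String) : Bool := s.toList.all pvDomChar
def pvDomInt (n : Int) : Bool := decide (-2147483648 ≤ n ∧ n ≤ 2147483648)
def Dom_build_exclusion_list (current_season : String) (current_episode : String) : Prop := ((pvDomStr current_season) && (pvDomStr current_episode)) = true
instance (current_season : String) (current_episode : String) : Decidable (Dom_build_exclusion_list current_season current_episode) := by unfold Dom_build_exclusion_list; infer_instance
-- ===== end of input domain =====

-- B replaces A's three append sections by comprehensions, generating the future-season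
-- block from a single flat index with divmod instead of two nested loops (objective: alternative).

-- ===== PORT A =====
-- f"{n:02d}" of A's f-strings
def pvFmt2A (n : Int) : String :=
  if 0 ≤ n ∧ n < 10 then "0" ++ PySem.Int.toStr n else PySem.Int.toStr n

def build_exclusion_list (current_season : String) (current_episode : String) : List (String × String) :=
  match PySem.Int.ofStr? (PySem.Str.slice current_season (some 1) none),
        PySem.Int.ofStr? (PySem.Str.slice current_episode (some 1) none) with
  | some season_num, some episode_num =>
    -- exclude_episodes = []; append current episode
    let ex0 : List (String × String) := [] ++ [(current_season, current_episode)]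
    -- for ep in range(episode_num + 1, 25): append (current_season, f"E{ep:02d}")
    let ex1 := (PySem.List.pyRange (episode_num + 1) 25).foldl
      (fun acc ep => acc ++ [(current_season, "E" ++ pvFmt2A ep)]) ex0
    -- for season in range(season_num + 1, 21): for ep in range(1, 25): append
    (PySem.List.pyRange (season_num + 1) 21).foldl
      (fun acc season => (PySem.List.pyRange 1 25).foldl
        (fun acc2 ep => acc2 ++ [("S" ++ pvFmt2A season, "E" ++ pvFmt2A ep)]) acc) ex1
  | _, _ => [(current_season, current_episode)]

-- ===== PORT B =====
-- f"{n:02d}" of B's "%02d" formatting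
def pvFmt2B (n : Int) : String :=
  if 0 ≤ n ∧ n < 10 then "0" ++ PySem.Int.toStr n else PySem.Int.toStr n

def build_exclusion_list_alt (current_season : String) (current_episode : String) : List (String × String) :=
  -- try/except as Option.bind/map with getD for the except branch
  (((PySem.Int.ofStr? (PySem.Str.slice current_season (some 1) none)).bind fun season_num =>
    (PySem.Int.ofStr? (PySem.Str.slice current_episode (some 1) none)).map fun episode_num =>
      let current := (PySem.List.pyRange (episode_num + 1) 25).map
        (fun ep => (current_season, "E" ++ pvFmt2B ep))
      let future := (PySem.List.pyRange 0 (24 * (20 - season_num))).map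
        (fun k => ("S" ++ pvFmt2B (season_num + 1 + PySem.Int.floordiv k 24),
                   "E" ++ pvFmt2B (1 + PySem.Int.mod k 24)))
      [(current_season, current_episode)] ++ current ++ future).getD
    [(current_season, current_episode)])

-- ===== PRECONDITION & SPEC =====
def Spec_build_exclusion_list (current_season : String) (current_episode : String) (out : List (String × String)) : Prop := out = build_exclusion_list_alt current_season current_episode
instance (current_season : String) (current_episode : String) (out : List (String × String)) : Decidable (Spec_build_exclusion_list current_season current_episode out) := by unfold Spec_build_exclusion_list; infer_instance

-- ===== CLAIM (what is proved, stated in full; the proofs are below) =====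
def Claim_equal_build_exclusion_list : Prop := ∀ (current_season : String) (current_episode : String), Dom_build_exclusion_list current_season current_episode → Spec_build_exclusion_list current_season current_episode (build_exclusion_list current_season current_episode)

-- ===== LEMMAS AND PROOFS =====

theorem pvRange_eq_map_range (a : Int) (m : Nat) :
    PySem.List.pyRange a (a + m) = (List.range m).map (fun i : Nat => a + (i : Int)) := by
  induction m generalizing a with
  | zero => simp [PySem.List.pyRange_one_eq_nil]
  | succ m ih =>
    rw [PySem.List.pyRange_one_cons (by push_cast; omega)]
    have hs : a + ((m + 1 : Nat) : Int) = (a + 1) + (m : Nat) := by push_cast; ring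
    rw [hs, ih (a + 1), List.range_succ_eq_map, List.map_cons, List.map_map]
    congr 1
    · simp
    · apply List.map_congr_left
      intro i _
      simp only [Function.comp]
      push_cast
      ring

theorem pvBlocks {α : Type} (g : Int → Int → α) (a : Int) (m : Nat) :
    ((List.range m).map (fun i : Nat => a + (i : Int))).flatMap
        (fun s => (PySem.List.pyRange 1 25).map (fun e => g s e))
      = (List.range (24 * m)).map
        (fun k => g (a + ((k / 24 : Nat) : Int)) (1 + ((k % 24 : Nat) : Int))) := by
  induction m with
  | zero => simp
  | succ m ih =>
    rw [List.range_succ, List.map_append, List.flatMap_append, ih]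
    have h24 : 24 * (m + 1) = 24 * m + 24 := by ring
    rw [h24, List.range_add, List.map_append]
    congr 1
    have hr : PySem.List.pyRange 1 25 = (List.range 24).map (fun j : Nat => 1 + (j : Int)) := by decide
    simp only [List.map_cons, List.map_nil, List.flatMap_cons, List.flatMap_nil,
      List.append_nil, hr, List.map_map]
    apply List.map_congr_left
    intro j hj
    have hj24 : j < 24 := List.mem_range.mp hj
    have h1 : (24 * m + j) / 24 = m := by omega
    have h2 : (24 * m + j) % 24 = j := by omega
    simp [Function.comp, h1, h2]

theorem pvKey {α : Type} (g : Int → Int → α) (sn : Int) :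
    (PySem.List.pyRange (sn + 1) 21).flatMap
        (fun s => (PySem.List.pyRange 1 25).map (fun e => g s e))
      = (PySem.List.pyRange 0 (24 * (20 - sn))).map
        (fun k => g (sn + 1 + PySem.Int.floordiv k 24) (1 + PySem.Int.mod k 24)) := by
  by_cases h : 20 ≤ sn
  · have hneg : (24 : Int) * (20 - sn) ≤ 0 := by nlinarith
    have e1 : PySem.List.pyRange (sn + 1) 21 = [] := PySem.List.pyRange_one_eq_nil (by omega)
    have e2 : PySem.List.pyRange 0 (24 * (20 - sn)) = [] := PySem.List.pyRange_one_eq_nil (by omega)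
    rw [e1, e2]
    simp
  · set m : Nat := (20 - sn).toNat with hm
    have h21 : (21 : Int) = (sn + 1) + (m : Int) := by omega
    have h24m : (24 * (20 - sn) : Int) = ((24 * m : Nat) : Int) := by push_cast; omega
    rw [h21, pvRange_eq_map_range, pvBlocks, h24m, PySem.List.pyRange_zero_natCast,
      List.map_map]
    apply List.map_congr_left
    intro k _
    simp [Function.comp]

-- ===== VERDICT (by name: the statement is the Claim_ definition above) =====
theorem build_exclusion_list_spec : Claim_equal_build_exclusion_list := by
  intro cs ce _
  unfold Spec_build_exclusion_list build_exclusion_list build_exclusion_list_alt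
  cases PySem.Int.ofStr? (PySem.Str.slice cs (some 1) none) with
  | none => cases PySem.Int.ofStr? (PySem.Str.slice ce (some 1) none) <;> rfl
  | some sn =>
    cases PySem.Int.ofStr? (PySem.Str.slice ce (some 1) none) with
    | none => rfl
    | some en =>
      simp only [Option.bind_some, Option.map_some, Option.getD_some,
        PySem.List.foldl_append_singleton_eq_map]
      rw [PySem.List.foldl_append_eq_flatMap]
      rw [pvKey (fun s e => ("S" ++ pvFmt2A s, "E" ++ pvFmt2A e)) sn]
      simp [pvFmt2A, pvFmt2B]
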